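-- pv_equiv track=rewrite | github.com/andyan77/diyu | clean_output/scripts/build_evidence_row_adjudication.py | section_heading_for
-- ===== SOURCE A (Python) =====
-- def section_heading_for(md_text: str, line_no: int) -> str:
--     """向上找最近的 markdown heading 行作为 original_section_heading"""
--     if line_no <= 0:
--         return ""
--     lines = md_text.splitlines()
--     for i in range(min(line_no, len(lines)) - 1, -1, -1):
--         s = lines[i].lstrip()
--         if s.startswith("#"):
--             return s.lstrip("# ").strip()
--     return ""
-- ===== SOURCE B (Python) =====
-- def section_heading_for(md_text: str, line_no: int) -> str:
--     """Forward single pass remembering the last heading seen before line_no."""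
--     if line_no <= 0:
--         return ""
--     lines = md_text.splitlines()
--     result = ""
--     for s in lines[:min(line_no, len(lines))]:
--         t = s.lstrip()
--         if t.startswith("#"):
--             result = t.lstrip("# ").strip()
--     return result
-- ===== Notes on version B (the rewrite author's own statement) =====
-- stated objective: alternative
-- what changed: Replaces A's backward scan with early return by a forward fold over the line prefix that remembers the last heading seen.
import Mathlib
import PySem

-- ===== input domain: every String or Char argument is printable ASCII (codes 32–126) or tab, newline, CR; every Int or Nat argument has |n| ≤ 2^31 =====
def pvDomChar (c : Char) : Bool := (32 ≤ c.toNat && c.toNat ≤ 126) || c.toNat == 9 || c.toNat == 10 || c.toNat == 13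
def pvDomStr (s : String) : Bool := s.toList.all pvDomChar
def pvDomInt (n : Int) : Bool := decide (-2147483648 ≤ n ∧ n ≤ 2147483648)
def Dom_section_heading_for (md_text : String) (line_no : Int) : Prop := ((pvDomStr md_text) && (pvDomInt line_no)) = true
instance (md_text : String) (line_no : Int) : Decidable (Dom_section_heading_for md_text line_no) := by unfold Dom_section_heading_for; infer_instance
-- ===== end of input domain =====

-- B replaces A's backward scan (early return at the first heading above line_no) by a
-- forward fold over the same line prefix that remembers the LAST heading seen; same values.

-- ===== PORT A =====
-- extract the heading text: s.lstrip('# ').strip()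
def pvHeadingText (s : String) : String :=
  PySem.Str.strip (PySem.Str.stripChars s "# ")

-- A's loop: for i in range(k-1, -1, -1), return at the first heading (recursion on i, downward)
def pvALoop (lines : List String) : Nat → String
  | 0 => ""
  | i + 1 =>
    let s := PySem.Str.lstrip (lines.getD i "")   -- i < lines.length always holds at call sites
    if PySem.Str.startswith s "#" then pvHeadingText s else pvALoop lines i

def section_heading_for (md_text : String) (line_no : Int) : String :=
  if line_no ≤ 0 then ""
  else
    let lines := PySem.Str.splitlines md_text
    pvALoop lines (min line_no (lines.length : Int)).toNat

-- ===== PORT B =====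
def section_heading_for_alt (md_text : String) (line_no : Int) : String :=
  if line_no ≤ 0 then ""
  else
    let lines := PySem.Str.splitlines md_text
    (lines.take (min line_no (lines.length : Int)).toNat).foldl
      (fun result s =>
        let t := PySem.Str.lstrip s
        if PySem.Str.startswith t "#" then pvHeadingText t else result) ""

-- ===== PRECONDITION & SPEC =====
def Spec_section_heading_for (md_text : String) (line_no : Int) (out : String) : Prop := out = section_heading_for_alt md_text line_no
instance (md_text : String) (line_no : Int) (out : String) : Decidable (Spec_section_heading_for md_text line_no out) := by unfold Spec_section_heading_for; infer_instance

-- ===== CLAIM (what is proved, stated in full; the proofs are below) =====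
def Claim_equal_section_heading_for : Prop := ∀ (md_text : String) (line_no : Int), Dom_section_heading_for md_text line_no → Spec_section_heading_for md_text line_no (section_heading_for md_text line_no)

-- ===== LEMMAS AND PROOFS =====
lemma pvLoop_eq_fold (lines : List String) :
    ∀ k, k ≤ lines.length →
      pvALoop lines k =
        (lines.take k).foldl
          (fun result s =>
            let t := PySem.Str.lstrip s
            if PySem.Str.startswith t "#" then pvHeadingText t else result) "" := by
  intro k
  induction k with
  | zero => intro _; simp [pvALoop]
  | succ i ih =>
    intro hk
    have hi : i < lines.length := Nat.lt_of_succ_le hk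
    have htake : lines.take (i + 1) = lines.take i ++ [lines[i]] :=
      List.take_succ_eq_append_getElem hi
    rw [htake, List.foldl_append, ← ih (Nat.le_of_lt hi)]
    simp only [pvALoop, List.getD_eq_getElem?_getD, List.getElem?_eq_getElem hi,
      Option.getD_some, List.foldl_cons, List.foldl_nil]


-- ===== VERDICT (by name: the statement is the Claim_ definition above) =====
theorem section_heading_for_spec : Claim_equal_section_heading_for := by
  intro md_text line_no _
  unfold Spec_section_heading_for section_heading_for section_heading_for_alt
  by_cases h : line_no ≤ 0
  · simp [h]
  · simp only [h, if_false]
    apply pvLoop_eq_fold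
    have : (min line_no ((PySem.Str.splitlines md_text).length : Int)) ≤ ((PySem.Str.splitlines md_text).length : Int) := min_le_right _ _
    omega
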